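-- pv_equiv track=rewrite | github.com/rcbellamy/ParallelRegression | ParallelRegression/__init__.py | termString
-- ===== SOURCE A (Python) =====
-- def has_term( formula, term ):
--     '''Returns True if `formula` either starts with `term` followed by one of
--     [ )+-~*:] or contains `term` followed by one those characters, preceeded by
--     one of [ (+-~*:].
--     '''
--     before = ' (+-~*:<>'
--     after = ' )+-~*:<>'
--     if formula.startswith( term ):
--         if len( formula ) == len( term ) or formula[len( term )] in after:
--             return( True )
--     for b in before:
--         i = formula.find( b )
--         while i >= 0:
--             if formula[i+1:].startswith( term ):
--                 if len( formula[i+1:] ) == len( term ):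
--                     return( True )
--                 if ( formula[i+len( term )+1] in after ):
--                     return( True )
--             i = formula.find( b, i + 1 )
--     return( False )
--
-- def termString( formula, termList ):
--     '''Returns the subset of terms in `termList` that occur in `formula`.
--     '''
--     termString = ''
--     for t in termList:
--         if has_term( formula, t ):
--             if len( termString ) > 0:
--                 termString += ', '
--             termString += t
--     return( termString )
-- ===== SOURCE B (Python) =====
-- def termString(formula, termList):
--     '''Returns the subset of terms in `termList` that occur in `formula`.'''
--     before = ' (+-~*:<>'
--     after = ' )+-~*:<>'
--     n = len(formula)
--     starts = [0] + [i + 1 for i, c in enumerate(formula) if c in before]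
--     def occurs(t):
--         m = len(t)
--         return any(formula.startswith(t, p)
--                    and (p + m == n or formula[p + m] in after)
--                    for p in starts)
--     return ', '.join(t for t in termList if occurs(t))
-- ===== Notes on version B (the rewrite author's own statement) =====
-- stated objective: faster
-- what changed: Replaces A's start-branch plus nine per-boundary-character find/while rescans (repeated per term) with one precomputed list of candidate start positions (0 and each index after a boundary char) shared by all terms, each term tested once per candidate, and replaces the manual separator accumulator with filter + ', '.join.
-- outside the precondition, e.g. on termString('+<', ['', '']): A returns '', B returns ', '
import Mathlib
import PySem

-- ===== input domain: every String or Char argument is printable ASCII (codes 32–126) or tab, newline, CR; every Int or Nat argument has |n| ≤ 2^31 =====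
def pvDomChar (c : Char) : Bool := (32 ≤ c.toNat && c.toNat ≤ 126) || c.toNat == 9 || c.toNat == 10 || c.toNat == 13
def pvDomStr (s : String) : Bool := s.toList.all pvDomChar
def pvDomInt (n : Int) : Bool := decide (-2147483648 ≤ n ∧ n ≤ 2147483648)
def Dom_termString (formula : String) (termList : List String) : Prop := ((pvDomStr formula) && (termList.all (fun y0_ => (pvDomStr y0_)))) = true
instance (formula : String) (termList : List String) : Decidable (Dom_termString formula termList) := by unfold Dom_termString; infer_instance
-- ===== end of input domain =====

-- B replaces A's start-branch plus nine per-boundary-character find/while rescans by one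
-- positional window test per candidate position, and A's manual separator accumulator by
-- filter + ', '.join (same cost class; structurally simpler).

-- ===== PORT A =====
def pvBefore : List Char := " (+-~*:<>".toList
def pvAfter : List Char := " )+-~*:<>".toList

-- the two early-return tests in the body of A's while loop at boundary index i;
-- pyGetD is exact here: formula[i+len(term)+1] is in range whenever that test is reached
def hasTermBody (F t : List Char) (i : Nat) : Bool :=
  if PySem.Chars.startswith (F.drop (i + 1)) t then
    if (F.drop (i + 1)).length = t.length then true
    else decide (PySem.List.pyGetD F ((i : Int) + (t.length : Int) + 1) ' ' ∈ pvAfter)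
  else false

-- termination fact for the while loop: a found occurrence of the single-char needle
-- lies at or after the search start and inside the haystack
theorem pvFindFrom_bounds (F : List Char) (b : Char) (s : Nat)
    (h : 0 ≤ PySem.Chars.findFrom F [b] (s : Int) none) :
    s ≤ (PySem.Chars.findFrom F [b] (s : Int) none).toNat ∧
      (PySem.Chars.findFrom F [b] (s : Int) none).toNat < F.length := by
  by_cases hs : s ≤ F.length
  · have hne : PySem.Chars.findFrom F [b] (s : Int) none ≠ -1 := by omega
    obtain ⟨h1, h2, _⟩ := PySem.Chars.findFrom_natCast_spec F [b] s hs hne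
    have hlen := h2.length_le
    simp only [List.length_singleton, List.length_drop] at hlen
    omega
  · exfalso
    have : PySem.Chars.findFrom F [b] (s : Int) none = -1 := by
      simp only [PySem.Chars.findFrom]
      have h1 : ¬ ((s : Int) < 0) := by omega
      have h2 : (F.length : Int) < (s : Int) := by omega
      simp [h1, h2]
    omega

-- A's while loop: i = formula.find(b, s); while i >= 0: <body>; i = formula.find(b, i+1)
def hasTermLoop (F t : List Char) (b : Char) (s : Nat) : Bool :=
  let i := PySem.Chars.findFrom F [b] (s : Int) none
  if h : 0 ≤ i then
    hasTermBody F t i.toNat || hasTermLoop F t b (i.toNat + 1)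
  else false
termination_by F.length - s
decreasing_by
  have := pvFindFrom_bounds F b s h
  omega

def hasTerm (F t : List Char) : Bool :=
  (if PySem.Chars.startswith F t then
     if F.length = t.length then true
     else decide (PySem.List.pyGetD F ((t.length : Int)) ' ' ∈ pvAfter)
   else false)
  || pvBefore.any (fun b => hasTermLoop F t b 0)

def termString (formula : String) (termList : List String) : String :=
  String.ofList (termList.foldl (fun acc t =>
    if hasTerm formula.toList t.toList then
      (if 0 < acc.length then acc ++ (", ".toList) else acc) ++ t.toList
    else acc) [])

-- ===== PORT B =====
-- Source B precomputes once the candidate start positions: 0 plus every index just after a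
-- boundary character, then tests each term only at those positions.
def pvStarts (F : List Char) : List Int :=
  0 :: (((PySem.List.enumerate F).filter (fun ic => decide (ic.2 ∈ pvBefore))).map
        (fun ic => ic.1 + 1))

-- Source B's test at candidate p: formula.startswith(t, p) and (p+m == n or formula[p+m] in after);
-- startswith(t, p) with 0 ≤ p is exactly "t prefix of the drop"; pyGetD is exact: the index is
-- in range whenever its test is reached
def occursAtB (F t : List Char) (p : Int) : Bool :=
  PySem.Chars.startswith (F.drop p.toNat) t &&
  (p + (t.length : Int) == (F.length : Int) ||
    decide (PySem.List.pyGetD F (p + (t.length : Int)) ' ' ∈ pvAfter))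

def occursB (F t : List Char) : Bool := (pvStarts F).any (occursAtB F t)

def termString_alt (formula : String) (termList : List String) : String :=
  PySem.Str.join ", " (termList.filter (fun t => occursB formula.toList t.toList))

-- ===== PRECONDITION & SPEC =====
-- Pre_ excludes term lists containing the empty string: on that degenerate input A's separator
-- bookkeeping silently drops a selected empty term while B's ''.join places a comma for it —
-- both behaviours are accidental choices and neither is the specified one.
def Pre_termString (formula : String) (termList : List String) : Prop := "" ∉ termList
instance (formula : String) (termList : List String) : Decidable (Pre_termString formula termList) := by unfold Pre_termString; infer_instance
def pvWitness_termString : String × List String := ("a + b*c", ["a", "b", "c*d", "x"])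

def Spec_termString (formula : String) (termList : List String) (out : String) : Prop := out = termString_alt formula termList
instance (formula : String) (termList : List String) (out : String) : Decidable (Spec_termString formula termList out) := by unfold Spec_termString; infer_instance

-- ===== CLAIM (what is proved, stated in full; the proofs are below) =====
def Claim_equal_termString : Prop := ∀ (formula : String) (termList : List String), Dom_termString formula termList → Pre_termString formula termList → Spec_termString formula termList (termString formula termList)

-- ===== LEMMAS AND PROOFS =====

-- the characterisation both programs decide: t sits at position p of F with delimited ends
def pvE (F t : List Char) (p : Nat) : Prop :=
  p + t.length ≤ F.length ∧ t <+: F.drop p ∧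
  (p = 0 ∨ F.getD (p - 1) ' ' ∈ pvBefore) ∧
  (p + t.length = F.length ∨ F.getD (p + t.length) ' ' ∈ pvAfter)

theorem occursAtB_iff (F t : List Char) (q : Nat) :
    occursAtB F t (q : Int) = true ↔
      (t <+: F.drop q ∧ (q + t.length = F.length ∨ F.getD (q + t.length) ' ' ∈ pvAfter)) := by
  have hcast : (q : Int) + (t.length : Int) = ((q + t.length : Nat) : Int) := by push_cast; ring
  unfold occursAtB
  rw [hcast, PySem.List.pyGetD_natCast, Int.toNat_natCast]
  simp only [Bool.and_eq_true, Bool.or_eq_true, beq_iff_eq, decide_eq_true_eq, Nat.cast_inj,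
    PySem.Chars.startswith_iff]

theorem occursB_iff (F t : List Char) : occursB F t = true ↔ ∃ p, pvE F t p := by
  unfold occursB pvStarts
  rw [List.any_eq_true]
  constructor
  · rintro ⟨x, hx, hox⟩
    rcases List.mem_cons.mp hx with rfl | hx
    · obtain ⟨h1, h2⟩ := (occursAtB_iff F t 0).mp (by exact_mod_cast hox)
      have hle : t.length ≤ F.length := by
        have := h1.length_le
        simpa using this
      exact ⟨0, by omega, h1, Or.inl rfl, h2⟩
    · obtain ⟨ic, hic, rfl⟩ := List.mem_map.mp hx
      obtain ⟨hmem, hcb⟩ := List.mem_filter.mp hic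
      obtain ⟨k, hk, rfl⟩ := (PySem.List.mem_enumerate_iff _ _ _).mp hmem
      simp only [decide_eq_true_eq] at hcb
      have hxcast : ((0 : Int) + (k : Int)) + 1 = (((k + 1 : Nat)) : Int) := by push_cast; ring
      rw [hxcast] at hox
      obtain ⟨h1, h2⟩ := (occursAtB_iff F t (k + 1)).mp hox
      have hle : t.length ≤ F.length - (k + 1) := by
        have := h1.length_le
        simpa using this
      refine ⟨k + 1, by omega, h1, Or.inr ?_, h2⟩
      have : k + 1 - 1 = k := by omega
      rw [this, List.getD_eq_getElem?_getD, List.getElem?_eq_getElem hk]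
      simpa using hcb
  · rintro ⟨p, hp1, hp2, hp3, hp4⟩
    rcases Nat.eq_zero_or_pos p with hp0 | hppos
    · subst hp0
      exact ⟨0, List.mem_cons_self .., by exact_mod_cast (occursAtB_iff F t 0).mpr ⟨hp2, hp4⟩⟩
    · obtain ⟨q, rfl⟩ : ∃ q, p = q + 1 := ⟨p - 1, by omega⟩
      have hq : q < F.length := by omega
      rcases hp3 with h | hbefore
      · omega
      · have hq1 : q + 1 - 1 = q := by omega
        rw [hq1, List.getD_eq_getElem?_getD, List.getElem?_eq_getElem hq] at hbefore
        simp only [Option.getD_some] at hbefore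
        refine ⟨((q + 1 : Nat) : Int), ?_, (occursAtB_iff F t (q + 1)).mpr ⟨hp2, hp4⟩⟩
        refine List.mem_cons.mpr (Or.inr ?_)
        refine List.mem_map.mpr ⟨((0 : Int) + (q : Int), F[q]), ?_, by push_cast; ring⟩
        exact List.mem_filter.mpr ⟨(PySem.List.mem_enumerate_iff _ _ _).mpr ⟨q, hq, rfl⟩,
          by simpa using hbefore⟩

theorem getD_eq_of_prefix_drop (F : List Char) (b : Char) (i : Nat)
    (h : [b] <+: F.drop i) (_hi : i < F.length) : F.getD i ' ' = b := by
  obtain ⟨r, hr⟩ := h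
  have h0 : (F.drop i)[0]? = some b := by rw [← hr]; rfl
  rw [List.getElem?_drop] at h0
  simp only [Nat.add_zero] at h0
  simp [List.getD_eq_getElem?_getD, h0]

theorem prefix_drop_of_getD (F : List Char) (b : Char) (i : Nat)
    (hi : i < F.length) (h : F.getD i ' ' = b) : [b] <+: F.drop i := by
  rw [List.drop_eq_getElem_cons hi]
  refine ⟨F.drop (i + 1), ?_⟩
  rw [List.getD_eq_getElem?_getD, List.getElem?_eq_getElem hi] at h
  simp at h
  simp [h]

theorem hasTermLoop_iff (F t : List Char) (b : Char) (s : Nat) :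
    hasTermLoop F t b s = true ↔
      ∃ i : Nat, s ≤ i ∧ i < F.length ∧ F.getD i ' ' = b ∧ hasTermBody F t i = true := by
  rw [hasTermLoop]
  by_cases h : 0 ≤ PySem.Chars.findFrom F [b] (s : Int) none
  · set i0 := PySem.Chars.findFrom F [b] (s : Int) none with hi0
    obtain ⟨hsi, hilt⟩ := pvFindFrom_bounds F b s h
    have hsn : s ≤ F.length := by omega
    have hne : i0 ≠ -1 := by omega
    obtain ⟨_, hpre, hmin⟩ := PySem.Chars.findFrom_natCast_spec F [b] s hsn hne
    have hb : F.getD i0.toNat ' ' = b := getD_eq_of_prefix_drop F b i0.toNat hpre hilt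
    rw [dif_pos h, Bool.or_eq_true, hasTermLoop_iff F t b (i0.toNat + 1)]
    constructor
    · rintro (hbody | ⟨i, hi1, hi2, hi3, hi4⟩)
      · exact ⟨i0.toNat, hsi, hilt, hb, hbody⟩
      · exact ⟨i, by omega, hi2, hi3, hi4⟩
    · rintro ⟨i, hi1, hi2, hi3, hi4⟩
      rcases Nat.lt_or_ge i (i0.toNat + 1) with hlt | hge
      · rcases Nat.lt_or_ge i i0.toNat with hlt2 | hge2
        · exact absurd (prefix_drop_of_getD F b i hi2 hi3) (hmin i hi1 hlt2)
        · have : i = i0.toNat := by omega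
          subst this
          exact Or.inl hi4
      · exact Or.inr ⟨i, hge, hi2, hi3, hi4⟩
  · rw [dif_neg h]
    simp only [Bool.false_eq_true, false_iff]
    rintro ⟨i, hi1, hi2, hi3, hi4⟩
    by_cases hsn : s ≤ F.length
    · have hfind : PySem.Chars.find (F.drop s) [b] = -1 := by
        have heq := PySem.Chars.findFrom_natCast F [b] s hsn
        by_contra hne
        rw [if_neg hne] at heq
        have := PySem.Chars.neg_one_le_find (F.drop s) [b]
        omega
      have hnin := (PySem.Chars.find_eq_neg_one_iff (F.drop s) [b]).mp hfind
      apply hnin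
      have hpre := prefix_drop_of_getD F b i hi2 hi3
      have : F.drop i = (F.drop s).drop (i - s) := by
        rw [List.drop_drop]; congr 1; omega
      rw [this] at hpre
      exact hpre.isInfix.trans (List.drop_suffix _ _).isInfix
    · omega
termination_by F.length - s
decreasing_by
  have := pvFindFrom_bounds F b s h
  omega

theorem hasTermBody_iff (F t : List Char) (i : Nat) (hi : i < F.length) :
    hasTermBody F t i = true ↔
      (t <+: F.drop (i + 1) ∧
        ((i + 1) + t.length = F.length ∨ F.getD ((i + 1) + t.length) ' ' ∈ pvAfter)) := by
  have hcast : ((i : Int) + (t.length : Int) + 1) = (((i + 1) + t.length : Nat) : Int) := by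
    push_cast; ring
  unfold hasTermBody
  rw [hcast, PySem.List.pyGetD_natCast]
  by_cases h1 : PySem.Chars.startswith (F.drop (i + 1)) t
  · rw [if_pos h1]
    have hp := (PySem.Chars.startswith_iff _ _).mp h1
    simp only [List.length_drop]
    by_cases h2 : F.length - (i + 1) = t.length
    · rw [if_pos h2]
      simp only [true_iff]
      exact ⟨hp, Or.inl (by omega)⟩
    · rw [if_neg h2]
      simp only [decide_eq_true_eq]
      constructor
      · exact fun h => ⟨hp, Or.inr h⟩
      · rintro ⟨_, h | h⟩
        · exact absurd (by omega : F.length - (i + 1) = t.length) h2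
        · exact h
  · rw [if_neg h1]
    simp only [Bool.false_eq_true, false_iff]
    rintro ⟨hp, _⟩
    exact h1 ((PySem.Chars.startswith_iff _ _).mpr hp)

theorem hasTerm_iff (F t : List Char) : hasTerm F t = true ↔ ∃ p, pvE F t p := by
  unfold hasTerm
  rw [Bool.or_eq_true, List.any_eq_true]
  have startIff :
      ((if PySem.Chars.startswith F t then
         if F.length = t.length then true
         else decide (PySem.List.pyGetD F ((t.length : Int)) ' ' ∈ pvAfter)
       else false) = true) ↔ pvE F t 0 := by
    rw [show ((t.length : Int)) = ((t.length : Nat) : Int) from rfl, PySem.List.pyGetD_natCast]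
    unfold pvE
    simp only [List.drop_zero, Nat.zero_add]
    by_cases h1 : PySem.Chars.startswith F t
    · rw [if_pos h1]
      have hp := (PySem.Chars.startswith_iff _ _).mp h1
      have hle : t.length ≤ F.length := hp.length_le
      by_cases h2 : F.length = t.length
      · rw [if_pos h2]
        simp only [true_iff]
        exact ⟨by omega, hp, Or.inl (by simp), Or.inl (by omega)⟩
      · rw [if_neg h2]
        simp only [decide_eq_true_eq]
        constructor
        · exact fun h => ⟨by omega, hp, Or.inl (by simp), Or.inr h⟩
        · rintro ⟨_, _, _, h | h⟩
          · exact absurd h.symm h2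
          · exact h
    · rw [if_neg h1]
      simp only [Bool.false_eq_true, false_iff]
      rintro ⟨_, hp, _⟩
      exact h1 ((PySem.Chars.startswith_iff _ _).mpr hp)
  rw [startIff]
  constructor
  · rintro (h0 | ⟨c, hc, hloop⟩)
    · exact ⟨0, h0⟩
    · rw [hasTermLoop_iff] at hloop
      obtain ⟨i, _, hilt, hgd, hbody⟩ := hloop
      obtain ⟨hpre, hafter⟩ := (hasTermBody_iff F t i hilt).mp hbody
      have hlen : t.length ≤ F.length - (i + 1) := by
        have := hpre.length_le
        simp only [List.length_drop] at this
        exact this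
      have hi1 : i + 1 - 1 = i := by omega
      refine ⟨i + 1, ⟨by omega, hpre, Or.inr ?_, hafter⟩⟩
      rw [hi1, hgd]; exact hc
  · rintro ⟨p, hp1, hp2, hp3, hp4⟩
    rcases Nat.eq_zero_or_pos p with hp0 | hppos
    · subst hp0
      exact Or.inl ⟨hp1, hp2, hp3, hp4⟩
    · right
      obtain ⟨i, rfl⟩ : ∃ i, p = i + 1 := ⟨p - 1, by omega⟩
      rcases hp3 with h | hbefore
      · omega
      · have hi1 : i + 1 - 1 = i := by omega
        rw [hi1] at hbefore
        refine ⟨F.getD i ' ', hbefore, ?_⟩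
        rw [hasTermLoop_iff]
        exact ⟨i, Nat.zero_le _, by omega, rfl,
          (hasTermBody_iff F t i (by omega)).mpr ⟨hp2, hp4⟩⟩

theorem hasTerm_eq_occursB (F t : List Char) : hasTerm F t = occursB F t := by
  rw [Bool.eq_iff_iff, hasTerm_iff, occursB_iff]

theorem fold_nonempty (g : String → Bool) (sep : List Char) (ts : List String)
    (acc : List Char) (hacc : acc ≠ []) :
    ts.foldl (fun acc t => if g t then (if 0 < acc.length then acc ++ sep else acc) ++ t.toList else acc) acc
      = acc ++ ((ts.filter g).map (fun t => sep ++ t.toList)).flatten := by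
  induction ts generalizing acc with
  | nil => simp
  | cons t ts ih =>
    simp only [List.foldl_cons, List.filter_cons]
    by_cases hg : g t
    · rw [if_pos hg, if_pos hg, if_pos (List.length_pos_iff.mpr hacc)]
      rw [ih (acc ++ sep ++ t.toList) (List.append_ne_nil_of_left_ne_nil (List.append_ne_nil_of_left_ne_nil hacc _) _)]
      simp only [List.map_cons, List.flatten_cons, List.append_assoc]
    · rw [if_neg hg, if_neg hg, ih acc hacc]

theorem join_cons_eq (sep x : List Char) (parts : List (List Char)) :
    PySem.Chars.join sep (x :: parts) = x ++ (parts.map (fun u => sep ++ u)).flatten := by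
  induction parts generalizing x with
  | nil => simp [PySem.Chars.join_singleton]
  | cons y ps ih => rw [PySem.Chars.join_cons_cons, ih y]; simp [List.append_assoc]

theorem fold_empty (g : String → Bool) (sep : List Char) (ts : List String)
    (hts : ∀ t ∈ ts, g t = true → t.toList ≠ []) :
    ts.foldl (fun acc t => if g t then (if 0 < acc.length then acc ++ sep else acc) ++ t.toList else acc) []
      = PySem.Chars.join sep ((ts.filter g).map String.toList) := by
  induction ts with
  | nil => simp [PySem.Chars.join_nil]
  | cons t ts ih =>
    simp only [List.foldl_cons, List.filter_cons]
    by_cases hg : g t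
    · rw [if_pos hg, if_pos hg]
      simp only [List.length_nil, Nat.lt_irrefl, if_false, List.nil_append]
      rw [fold_nonempty g sep ts t.toList (hts t (by simp) hg)]
      rw [List.map_cons, join_cons_eq]
      simp only [List.map_map]
      rfl
    · rw [if_neg hg, if_neg hg, ih (fun u hu h => hts u (by simp [hu]) h)]

-- ===== VERDICT (by name: the statement is the Claim_ definition above) =====
theorem termString_spec : Claim_equal_termString := by
  intro formula termList _ hpre
  unfold Spec_termString termString termString_alt
  have hts : ∀ t ∈ termList, (hasTerm formula.toList t.toList) = true → t.toList ≠ [] := by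
    intro t ht _ hnil
    exact hpre (String.toList_eq_nil_iff.mp hnil ▸ ht)
  rw [fold_empty _ (", ".toList) termList hts]
  have hfil : termList.filter (fun t => hasTerm formula.toList t.toList)
      = termList.filter (fun t => occursB formula.toList t.toList) :=
    List.filter_congr (fun t _ => by rw [hasTerm_eq_occursB])
  rw [hfil]
  apply String.toList_injective
  rw [PySem.Str.toList_join]
  simp
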